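-- pv_equiv track=rewrite | github.com/GutMat/CVRP | cvrp.py | penalty_capacity
-- ===== SOURCE A (Python) =====
-- def penalty_capacity(chromosome):
--         actual = chromosome
--         value_penalty = 0
--         capacity_list = []
--         index_cap = 0
--         overloads = 0
--
--         for i in range(0,len(trucks)+1):
--             init = 0
--             capacity_list.append(init)
--
--
--         for (k,v) in actual:
--             if k not in trucks:
--                 capacity_list[int(index_cap)]+=v
--             else:
--                 index_cap+= 1
--
--             if  capacity_list[index_cap] > capacity_trucks:
--                 overloads+=1
--                 value_penalty+= 100 * overloads
--         return value_penalty
--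
-- capacity_trucks = 1000
--
-- trucks = ['truck_1','truck_2', 'truck_3','truck_4','truck_5']
-- ===== SOURCE B (Python) =====
-- capacity_trucks = 1000
--
-- trucks = ['truck_1','truck_2', 'truck_3','truck_4','truck_5']
--
-- def _prefix_sums(values):
--     sums = []
--     total = 0
--     for v in values:
--         total += v
--         sums.append(total)
--     return sums
--
-- def penalty_capacity(chromosome):
--     # stage 1: cut the gene list into per-truck load segments at the truck markers
--     segments = []
--     current = []
--     for k, v in chromosome:
--         if k in trucks:
--             segments.append(current)
--             current = []
--         else:
--             current.append(v)
--     segments.append(current)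
--     # stage 2: every segment prefix exceeding the capacity is one failed check
--     checks = sum(1 for seg in segments for s in _prefix_sums(seg) if s > capacity_trucks)
--     # penalty 100*(1+2+...+checks) in closed form
--     return 100 * checks * (checks + 1) // 2
-- ===== Notes on version B (the rewrite author's own statement) =====
-- stated objective: alternative
-- what changed: B replaces A's single stateful pass (six-slot capacity list, index pointer, incrementally accumulated penalty) with a staged computation: split the chromosome into per-truck segments, count overloaded segment prefixes with a helper, and return the closed form 100*checks*(checks+1)//2.
import Mathlib
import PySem

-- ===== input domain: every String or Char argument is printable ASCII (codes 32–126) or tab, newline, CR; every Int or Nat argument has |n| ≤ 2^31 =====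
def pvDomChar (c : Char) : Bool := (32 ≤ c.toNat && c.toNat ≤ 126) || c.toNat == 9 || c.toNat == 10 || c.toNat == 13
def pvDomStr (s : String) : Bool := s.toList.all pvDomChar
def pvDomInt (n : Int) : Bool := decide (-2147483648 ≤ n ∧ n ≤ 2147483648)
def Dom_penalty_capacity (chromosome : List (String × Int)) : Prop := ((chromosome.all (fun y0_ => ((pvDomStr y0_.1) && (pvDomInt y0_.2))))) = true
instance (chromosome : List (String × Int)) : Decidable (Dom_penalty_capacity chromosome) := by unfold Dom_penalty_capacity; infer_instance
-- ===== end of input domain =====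

-- B replaces A's six-slot capacity list, index pointer and incremental penalty by a staged
-- computation: split into per-truck segments, count overloaded segment prefixes, closed-form penalty (objective: alternative).


-- ===== PORT A =====
def pvTrucks : List String := ["truck_1", "truck_2", "truck_3", "truck_4", "truck_5"]

def pvCapacityTrucks : Int := 1000

-- loop body of A: state (value_penalty, capacity_list, index_cap, overloads)
def pcStepA (st : Int × List Int × Nat × Int) (p : String × Int) : Int × List Int × Nat × Int :=
  let (pen, caps, idx, ov) := st
  let (caps, idx) :=
    if p.1 ∈ pvTrucks then (caps, idx + 1)
    else (caps.set idx (caps.getD idx 0 + p.2), idx)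
  if caps.getD idx 0 > pvCapacityTrucks then (pen + 100 * (ov + 1), caps, idx, ov + 1)
  else (pen, caps, idx, ov)

def penalty_capacity (chromosome : List (String × Int)) : Int :=
  (chromosome.foldl pcStepA (0, List.replicate (pvTrucks.length + 1) 0, 0, 0)).1

-- ===== PORT B =====
-- _prefix_sums: running-total fold producing the list of prefix sums
def pcPsStep (st : List Int × Int) (v : Int) : List Int × Int :=
  (st.1 ++ [st.2 + v], st.2 + v)

def pvPrefixSums (values : List Int) : List Int :=
  (values.foldl pcPsStep (([] : List Int), (0 : Int))).1

-- stage-1 loop body: state (segments, current)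
def pcSplitStep (st : List (List Int) × List Int) (p : String × Int) : List (List Int) × List Int :=
  if p.1 ∈ pvTrucks then (st.1 ++ [st.2], []) else (st.1, st.2 ++ [p.2])

def pcSplit (chromosome : List (String × Int)) : List (List Int) :=
  let st := chromosome.foldl pcSplitStep ([], [])
  st.1 ++ [st.2]

def penalty_capacity_alt (chromosome : List (String × Int)) : Int :=
  let checks : Int :=
    ((pcSplit chromosome).map
      (fun seg => ((pvPrefixSums seg).countP (fun s => s > pvCapacityTrucks) : Int))).sum
  PySem.Int.floordiv (100 * checks * (checks + 1)) 2

-- ===== PRECONDITION & SPEC =====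
-- Pre_ excludes exactly the inputs on which A raises IndexError: six or more truck markers,
-- so index_cap runs past the end of the 6-slot capacity_list.
def Pre_penalty_capacity (chromosome : List (String × Int)) : Prop :=
  chromosome.countP (fun p => p.1 ∈ pvTrucks) ≤ 5
instance (chromosome : List (String × Int)) : Decidable (Pre_penalty_capacity chromosome) := by
  unfold Pre_penalty_capacity; infer_instance

def pvWitness_penalty_capacity : (List (String × Int)) :=
  [("a", 600), ("truck_1", 1), ("b", 1200)]

def Spec_penalty_capacity (chromosome : List (String × Int)) (out : Int) : Prop := out = penalty_capacity_alt chromosome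
instance (chromosome : List (String × Int)) (out : Int) : Decidable (Spec_penalty_capacity chromosome out) := by unfold Spec_penalty_capacity; infer_instance

-- ===== CLAIM (what is proved, stated in full; the proofs are below) =====
def Claim_equal_penalty_capacity : Prop := ∀ (chromosome : List (String × Int)), Dom_penalty_capacity chromosome → Pre_penalty_capacity chromosome → Spec_penalty_capacity chromosome (penalty_capacity chromosome)


-- ===== LEMMAS AND PROOFS =====

-- proof-only recursive count of overloaded checks on the remaining list, given the running segment sum
def pcG : List (String × Int) → Int → Int
  | [], _ => 0
  | (k, v) :: l, seg =>
    if k ∈ pvTrucks then pcG l 0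
    else (if seg + v > pvCapacityTrucks then 1 else 0) + pcG l (seg + v)

-- A-side invariant: the fold's penalty component is the triangular closed form in ov + pcG.
theorem pc_loopA (l : List (String × Int)) (pen : Int) (caps : List Int) (idx : Nat) (ov seg : Int)
    (hlen : caps.length = 6)
    (hidx : idx + l.countP (fun p => p.1 ∈ pvTrucks) ≤ 5)
    (hcur : caps.getD idx 0 = seg)
    (hzero : ∀ j, idx < j → caps.getD j 0 = 0)
    (hpen : pen = 50 * ov * (ov + 1)) :
    (l.foldl pcStepA (pen, caps, idx, ov)).1
      = 50 * (ov + pcG l seg) * (ov + pcG l seg + 1) := by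
  induction l generalizing pen caps idx ov seg with
  | nil => simpa [pcG] using hpen
  | cons p l ih =>
    obtain ⟨k, v⟩ := p
    simp only [List.foldl_cons, List.countP_cons] at hidx ⊢
    by_cases hk : k ∈ pvTrucks
    · have hidx' : idx + 1 ≤ 5 := by simp [hk] at hidx; omega
      have hfresh : caps.getD (idx + 1) 0 = 0 := hzero _ (Nat.lt_succ_self idx)
      have hfresh' : caps[idx + 1]?.getD 0 = 0 := by simpa [List.getD] using hfresh
      have hA : pcStepA (pen, caps, idx, ov) (k, v) = (pen, caps, idx + 1, ov) := by
        simp [pcStepA, hk, hfresh', pvCapacityTrucks]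
      rw [hA]
      simpa [pcG, hk] using
        ih pen caps (idx + 1) ov 0 hlen (by simp [hk] at hidx ⊢; omega) hfresh
          (fun j hj => hzero _ (by omega)) hpen
    · have hidx5 : idx < 6 := by omega
      have hidxlen : idx < caps.length := by omega
      set caps' := caps.set idx (caps.getD idx 0 + v) with hcaps'
      have hlen' : caps'.length = 6 := by simp [hcaps', hlen]
      have hcur' : caps'.getD idx 0 = seg + v := by
        simp [hcaps', List.getD, List.getElem?_set_self hidxlen, ← hcur]
      have hzero' : ∀ j, idx < j → caps'.getD j 0 = 0 := by
        intro j hj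
        have : caps'.getD j 0 = caps.getD j 0 := by
          simp [hcaps', List.getD, List.getElem?_set_ne (by omega : idx ≠ j)]
        rw [this]; exact hzero j hj
      have hc : caps'[idx]?.getD 0 = seg + v := by simpa [List.getD] using hcur'
      by_cases hover : seg + v > pvCapacityTrucks
      · have hA : pcStepA (pen, caps, idx, ov) (k, v) = (pen + 100 * (ov + 1), caps', idx, ov + 1) := by
          simp only [pcStepA, if_neg hk, ← hcaps']
          simp [hc, hover]
        rw [hA]
        have := ih (pen + 100 * (ov + 1)) caps' idx (ov + 1) (seg + v) hlen'
          (by simp [hk] at hidx ⊢; omega) hcur' hzero' (by rw [hpen]; ring)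
        rw [this]
        simp only [pcG, if_neg hk, if_pos hover]
        ring
      · have hA : pcStepA (pen, caps, idx, ov) (k, v) = (pen, caps', idx, ov) := by
          simp only [pcStepA, if_neg hk, ← hcaps']
          simp [hc, hover]
        rw [hA]
        have := ih pen caps' idx ov (seg + v) hlen'
          (by simp [hk] at hidx ⊢; omega) hcur' hzero' hpen
        rw [this]
        simp [pcG, hk, hover]

-- shifted prefix sums starting from s, the shape _prefix_sums' fold produces
def pcShift : Int → List Int → List Int
  | _, [] => []
  | s, v :: l => (s + v) :: pcShift (s + v) l

theorem ps_fold (l : List Int) : ∀ (out : List Int) (s : Int),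
    l.foldl pcPsStep (out, s) = (out ++ pcShift s l, s + l.sum) := by
  induction l with
  | nil => intro out s; simp [pcShift]
  | cons v l ih =>
    intro out s
    simp only [List.foldl_cons, pcPsStep, List.sum_cons, pcShift, ih]
    rw [Prod.mk.injEq]
    exact ⟨by simp, by ring⟩

theorem prefixSums_eq (l : List Int) : pvPrefixSums l = pcShift 0 l := by
  simp [pvPrefixSums, ps_fold]

theorem shift_append (l : List Int) : ∀ (s v : Int),
    pcShift s (l ++ [v]) = pcShift s l ++ [s + l.sum + v] := by
  induction l with
  | nil => intro s v; simp [pcShift]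
  | cons w l ih =>
    intro s v
    simp only [List.cons_append, pcShift, ih, List.sum_cons]
    have h : s + w + l.sum + v = s + (w + l.sum) + v := by ring
    rw [h]

-- count of overloaded prefixes of one finished segment, as an Int
def pcCnt (seg : List Int) : Int :=
  ((pvPrefixSums seg).countP (fun s => s > pvCapacityTrucks) : Int)

theorem cnt_append (cur : List Int) (v : Int) :
    pcCnt (cur ++ [v]) = pcCnt cur + (if cur.sum + v > pvCapacityTrucks then 1 else 0) := by
  simp only [pcCnt, prefixSums_eq, shift_append, List.countP_append]
  by_cases h : cur.sum + v > pvCapacityTrucks <;>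
    simp [h]

-- B-side invariant: the staged split/count equals pcG of the remaining list.
theorem pc_loopB (l : List (String × Int)) : ∀ (segs : List (List Int)) (cur : List Int),
    ((((l.foldl pcSplitStep (segs, cur)).1 ++ [(l.foldl pcSplitStep (segs, cur)).2]).map pcCnt).sum)
      = (segs.map pcCnt).sum + pcCnt cur + pcG l cur.sum := by
  induction l with
  | nil => intro segs cur; simp [pcG]
  | cons p l ih =>
    intro segs cur
    obtain ⟨k, v⟩ := p
    by_cases hk : k ∈ pvTrucks
    · have hstep : pcSplitStep (segs, cur) (k, v) = (segs ++ [cur], []) := by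
        simp [pcSplitStep, hk]
      simp only [List.foldl_cons, hstep, ih]
      simp [pcG, hk, pcCnt, pvPrefixSums]
    · have hstep : pcSplitStep (segs, cur) (k, v) = (segs, cur ++ [v]) := by
        simp [pcSplitStep, hk]
      simp only [List.foldl_cons, hstep, ih, cnt_append, pcG, if_neg hk, List.sum_append]
      simp only [List.sum_cons, List.sum_nil, add_zero]
      ring

theorem alt_eq_g (chromosome : List (String × Int)) :
    penalty_capacity_alt chromosome
      = PySem.Int.floordiv (100 * pcG chromosome 0 * (pcG chromosome 0 + 1)) 2 := by
  have hmap : (fun seg => (((pvPrefixSums seg).countP (fun s => s > pvCapacityTrucks) : Nat) : Int)) = pcCnt := rfl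
  have h := pc_loopB chromosome [] []
  have hnil : pcCnt [] = 0 := rfl
  simp only [List.map_nil, List.sum_nil, zero_add, hnil, add_zero] at h
  simp only [penalty_capacity_alt, pcSplit, hmap, h]

theorem floordiv_tri (t : Int) : PySem.Int.floordiv (100 * t * (t + 1)) 2 = 50 * t * (t + 1) := by
  have h : 100 * t * (t + 1) = 2 * (50 * t * (t + 1)) := by ring
  rw [h, PySem.Int.floordiv_eq_ediv_of_pos (by omega)]
  omega

-- ===== VERDICT (by name: the statement is the Claim_ definition above) =====
theorem penalty_capacity_spec : Claim_equal_penalty_capacity := by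
  intro ch _ hpre
  unfold Spec_penalty_capacity penalty_capacity
  rw [alt_eq_g, floordiv_tri]
  simpa using pc_loopA ch 0 (List.replicate (pvTrucks.length + 1) 0) 0 0 0 (by simp [pvTrucks])
    (by simpa [Pre_penalty_capacity] using hpre) (by simp) (by intro j hj; simp [List.getD])
    (by ring)
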